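-- pv_equiv track=rewrite | github.com/ZIJIAN004/UniCOP | lkh_solver.py | _split_multi_routes
-- ===== SOURCE A (Python) =====
-- def _split_multi_routes(tour: list, depot_lkh: int = 1) -> list[list]:
--     """
--     将含多次 depot 访问的 LKH tour 拆分为多条路线（0-indexed）。
--     LKH-3 multi-vehicle 输出中 depot 出现多次，用于分隔路线。
--     """
--     routes = []
--     current = [0]   # 0-indexed depot
--     for v in tour:
--         if v == depot_lkh:
--             if len(current) > 1:
--                 current.append(0)
--                 routes.append(current)
--                 current = [0]
--         else:
--             current.append(v - 1)   # 1-indexed → 0-indexed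
--     if len(current) > 1:
--         current.append(0)
--         routes.append(current)
--     return routes if routes else [[0, 0]]
-- ===== SOURCE B (Python) =====
-- def _split_multi_routes(tour: list, depot_lkh: int = 1) -> list[list]:
--     # Index-based: collect the depot positions first, then slice the tour
--     # between consecutive cut points and transform each non-trivial slice.
--     cuts = [-1] + [i for i, v in enumerate(tour) if v == depot_lkh] + [len(tour)]
--     routes = [[0] + [v - 1 for v in tour[a + 1:b]] + [0]
--               for a, b in zip(cuts, cuts[1:]) if b - a > 1]
--     return routes if routes else [[0, 0]]
-- ===== Notes on version B (the rewrite author's own statement) =====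
-- stated objective: alternative
-- what changed: Replaced A's single stateful accumulator loop by an index-based staging: first collect all depot positions (plus sentinels -1 and len), then slice the tour between consecutive cut points and transform each slice of positive length into a depot-bracketed 0-indexed route.
import Mathlib
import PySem

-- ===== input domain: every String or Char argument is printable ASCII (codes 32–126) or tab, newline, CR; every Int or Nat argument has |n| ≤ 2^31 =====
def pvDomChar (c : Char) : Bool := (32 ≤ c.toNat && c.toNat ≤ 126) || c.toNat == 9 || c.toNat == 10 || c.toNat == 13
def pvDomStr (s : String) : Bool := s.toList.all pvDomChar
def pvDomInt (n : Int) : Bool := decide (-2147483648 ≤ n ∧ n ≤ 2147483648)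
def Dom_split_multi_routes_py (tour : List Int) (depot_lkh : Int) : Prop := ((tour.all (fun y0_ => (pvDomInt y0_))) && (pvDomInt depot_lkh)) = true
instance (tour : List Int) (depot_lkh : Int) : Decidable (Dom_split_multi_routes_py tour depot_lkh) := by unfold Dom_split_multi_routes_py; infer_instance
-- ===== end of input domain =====

-- B replaces A's single stateful accumulator loop by an index-based staging (collect depot
-- positions with sentinels, then slice between consecutive cut points); objective: alternative.


-- ===== PORT A =====
-- loop body of A: state = (routes, current)
def pvStepA (d : Int) (s : List (List Int) × List Int) (v : Int) : List (List Int) × List Int :=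
  if v == d then
    (if s.2.length > 1 then (s.1 ++ [s.2 ++ [0]], [0]) else s)
  else (s.1, s.2 ++ [v - 1])

-- the trailing 'if len(current) > 1: …' flush after the loop
def pvFlushA (s : List (List Int) × List Int) : List (List Int) :=
  if s.2.length > 1 then s.1 ++ [s.2 ++ [0]] else s.1

def split_multi_routes_py (tour : List Int) (depot_lkh : Int) : List (List Int) :=
  let st := tour.foldl (pvStepA depot_lkh) ([], [0])
  let routes := pvFlushA st
  if routes.isEmpty then [[0, 0]] else routes

-- ===== PORT B =====
-- cuts = [-1] + [i for i, v in enumerate(tour) if v == depot_lkh] + [len(tour)]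
def pvCuts (tour : List Int) (depot_lkh : Int) : List Int :=
  [-1] ++ ((PySem.List.enumerate tour 0).filter (fun p => p.2 == depot_lkh)).map (fun p => p.1)
    ++ [(tour.length : Int)]

-- [0] + [v - 1 for v in tour[a+1:b]] + [0]
def pvBody (tour : List Int) (p : Int × Int) : List Int :=
  0 :: ((PySem.List.slice tour (some (p.1 + 1)) (some p.2)).map (fun v => v - 1) ++ [0])

def split_multi_routes_py_alt (tour : List Int) (depot_lkh : Int) : List (List Int) :=
  let cuts := pvCuts tour depot_lkh
  let routes := ((cuts.zip (PySem.List.slice cuts (some 1) none)).filter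
      (fun p => decide (1 < p.2 - p.1))).map (pvBody tour)
  if routes.isEmpty then [[0, 0]] else routes

-- ===== PRECONDITION & SPEC =====
def Spec_split_multi_routes_py (tour : List Int) (depot_lkh : Int) (out : List (List Int)) : Prop := out = split_multi_routes_py_alt tour depot_lkh
instance (tour : List Int) (depot_lkh : Int) (out : List (List Int)) : Decidable (Spec_split_multi_routes_py tour depot_lkh out) := by unfold Spec_split_multi_routes_py; infer_instance

-- ===== CLAIM (what is proved, stated in full; the proofs are below) =====
def Claim_equal_split_multi_routes_py : Prop := ∀ (tour : List Int) (depot_lkh : Int), Dom_split_multi_routes_py tour depot_lkh → Spec_split_multi_routes_py tour depot_lkh (split_multi_routes_py tour depot_lkh)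

-- ===== LEMMAS AND PROOFS =====

-- [0] + [v - 1 for v in r] + [0], for a run r
def pvRoute (r : List Int) : List Int := 0 :: (r.map (fun v => v - 1) ++ [0])

def pvMapRoutes (runs : List (List Int)) : List (List Int) :=
  (runs.filter (fun r => !r.isEmpty)).map pvRoute

-- splitting step: state = (finished runs, current run)
def pvStepB (d : Int) (s : List (List Int) × List Int) (v : Int) : List (List Int) × List Int :=
  if v == d then (s.1 ++ [s.2], []) else (s.1, s.2 ++ [v])

def pvRunsFrom (d : Int) (run : List Int) (t : List Int) : List (List Int) :=
  let s := t.foldl (pvStepB d) ([], run); s.1 ++ [s.2]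

-- maximal stretches between depot markers, including empty ones
def pvRuns (tour : List Int) (d : Int) : List (List Int) := pvRunsFrom d [] tour

-- depot positions enumerated from s
def pvPos (tour : List Int) (d : Int) (s : Int) : List Int :=
  ((PySem.List.enumerate tour s).filter (fun p => p.2 == d)).map (fun p => p.1)

def pvSegs (l : List Int) : List (Int × Int) := l.zip l.tail

-- B's core (cuts rewritten through cuts[1:] = tail)
def pvRoutesB (tour : List Int) (d : Int) : List (List Int) :=
  ((pvSegs (pvCuts tour d)).filter (fun p => decide (1 < p.2 - p.1))).map (pvBody tour)

-- B's fold only appends to the runs accumulator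
theorem pvStepB_acc (tour : List Int) (d : Int) : ∀ (acc : List (List Int)) (run : List Int),
    tour.foldl (pvStepB d) (acc, run)
      = (acc ++ (tour.foldl (pvStepB d) ([], run)).1, (tour.foldl (pvStepB d) ([], run)).2) := by
  induction tour with
  | nil => intro acc run; simp
  | cons v t ih =>
    intro acc run
    by_cases h : v == d
    · simp [List.foldl_cons, pvStepB, h, ih (acc ++ [run]) [], ih [run] []]
    · simp only [List.foldl_cons, pvStepB, h, Bool.false_eq_true, if_false]
      exact ih acc (run ++ [v])

-- main correspondence between A's loop state and the runs
theorem pvCorr (tour : List Int) (d : Int) : ∀ (accA : List (List Int)) (run : List Int),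
    pvFlushA (tour.foldl (pvStepA d) (accA, 0 :: run.map (fun v => v - 1)))
      = accA ++ pvMapRoutes ((tour.foldl (pvStepB d) ([], run)).1
                              ++ [(tour.foldl (pvStepB d) ([], run)).2]) := by
  induction tour with
  | nil =>
    intro accA run
    cases run with
    | nil => simp [pvFlushA, pvMapRoutes]
    | cons a l =>
      simp only [List.foldl_nil, pvFlushA, pvMapRoutes, List.map_cons]
      rw [if_pos (by simp)]
      simp [pvRoute]
  | cons v t ih =>
    intro accA run
    by_cases h : v == d
    · cases run with
      | nil =>
        have hb := pvStepB_acc t d [[]] []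
        have hi := ih accA []
        simp only [List.map_nil] at hi
        simp [List.foldl_cons, pvStepA, pvStepB, h, hb, pvMapRoutes, hi]
      | cons a l =>
        have hb := pvStepB_acc t d [a :: l] []
        have hi := ih (accA ++ [pvRoute (a :: l)]) []
        simp only [List.map_nil] at hi
        simp only [List.foldl_cons, pvStepA, pvStepB, h, if_pos, List.map_cons]
        rw [if_pos (by simp)]
        simp only [List.cons_append, List.nil_append]
        rw [show (0 : Int) :: (a - 1) :: (l.map (fun v => v - 1) ++ [0])
              = pvRoute (a :: l) by simp [pvRoute]]
        rw [hi, hb]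
        simp [pvMapRoutes, pvRoute, List.append_assoc]
    · have : (0 : Int) :: run.map (fun v => v - 1) ++ [v - 1]
          = 0 :: (run ++ [v]).map (fun v => v - 1) := by simp
      simp only [List.foldl_cons, pvStepA, pvStepB, h, if_neg, Bool.false_eq_true,
        not_false_eq_true, this]
      exact ih accA (run ++ [v])

-- prefix of the current run is carried into the first produced run
theorem pvRunsFrom_nil (d : Int) (run : List Int) : pvRunsFrom d run [] = [run] := rfl

theorem pvRunsFrom_cons_depot (t : List Int) (d v : Int) (run : List Int) (h : v == d) :
    pvRunsFrom d run (v :: t) = run :: pvRunsFrom d [] t := by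
  simp only [pvRunsFrom, List.foldl_cons, pvStepB, h, if_pos, List.nil_append]
  rw [pvStepB_acc t d [run] []]
  simp

theorem pvRunsFrom_cons_other (t : List Int) (d v : Int) (run : List Int) (h : ¬ v == d) :
    pvRunsFrom d run (v :: t) = pvRunsFrom d (run ++ [v]) t := by
  simp only [pvRunsFrom, List.foldl_cons, pvStepB, h, Bool.false_eq_true, if_false]

theorem pvRunsFrom_prefix (t : List Int) (d : Int) : ∀ (pre run : List Int),
    pvRunsFrom d (pre ++ run) t
      = (pre ++ (pvRunsFrom d run t).headI) :: (pvRunsFrom d run t).tail := by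
  induction t with
  | nil => intro pre run; simp [pvRunsFrom_nil]
  | cons v t ih =>
    intro pre run
    by_cases h : v == d
    · rw [pvRunsFrom_cons_depot t d v _ h, pvRunsFrom_cons_depot t d v _ h]
      rfl
    · rw [pvRunsFrom_cons_other t d v _ h, pvRunsFrom_cons_other t d v _ h,
        List.append_assoc]
      exact ih pre (run ++ [v])

theorem pvRuns_cons_depot (t : List Int) (d v : Int) (h : v == d) :
    pvRuns (v :: t) d = [] :: pvRuns t d := by
  rw [pvRuns, pvRunsFrom_cons_depot t d v [] h]; rfl

theorem pvRuns_cons_other (t : List Int) (d v : Int) (h : ¬ v == d) :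
    pvRuns (v :: t) d = (v :: (pvRuns t d).headI) :: (pvRuns t d).tail := by
  rw [pvRuns, pvRunsFrom_cons_other t d v [] h,
    show (([] ++ [v] : List Int)) = [v] ++ [] from by simp, pvRunsFrom_prefix t d [v] []]
  rfl

theorem pvPos_cons (t : List Int) (d v s : Int) :
    pvPos (v :: t) d s = (if v == d then [s] else []) ++ pvPos t d (s + 1) := by
  by_cases h : v == d <;>
    simp [pvPos, PySem.List.enumerate_cons, h]

theorem pvPos_succ (t : List Int) (d : Int) : ∀ s : Int,
    pvPos t d (s + 1) = (pvPos t d s).map (· + 1) := by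
  induction t with
  | nil => intro s; simp [pvPos, PySem.List.enumerate]
  | cons x t ih =>
    intro s
    rw [pvPos_cons, pvPos_cons, ih (s + 1)]
    by_cases h : x == d <;> simp [h]

theorem pvPos_le (t : List Int) (d : Int) : ∀ (s : Int) (x : Int), x ∈ pvPos t d s → s ≤ x := by
  induction t with
  | nil => intro s x hx; simp [pvPos, PySem.List.enumerate] at hx
  | cons w t ih =>
    intro s x hx
    rw [pvPos_cons, List.mem_append] at hx
    rcases hx with hx | hx
    · rcases Bool.eq_false_or_eq_true (w == d) with h | h <;> simp [h] at hx; omega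
    · have := ih (s + 1) x hx; omega

theorem pvCuts_eq (t : List Int) (d : Int) :
    pvCuts t d = -1 :: (pvPos t d 0 ++ [(t.length : Int)]) := rfl

theorem pvCuts_mem_le (t : List Int) (d x : Int) (h : x ∈ pvCuts t d) : -1 ≤ x := by
  rw [pvCuts_eq] at h
  simp only [List.mem_cons, List.mem_append] at h
  rcases h with h | h | h
  · omega
  · have := pvPos_le t d 0 x h; omega
  · rcases h with h | h
    · subst h; omega
    · simp at h

theorem pvCuts_cons_depot (t : List Int) (d v : Int) (h : v == d) :
    pvCuts (v :: t) d = -1 :: (pvCuts t d).map (· + 1) := by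
  rw [pvCuts_eq, pvCuts_eq, pvPos_cons, pvPos_succ]
  simp [h]

theorem pvCuts_cons_other (t : List Int) (d v : Int) (h : ¬ v == d) :
    pvCuts (v :: t) d = -1 :: ((pvCuts t d).map (· + 1)).tail := by
  rw [pvCuts_eq, pvCuts_eq, pvPos_cons, pvPos_succ]
  simp [h]

theorem pvSegs_cons_cons (a b : Int) (l : List Int) :
    pvSegs (a :: b :: l) = (a, b) :: pvSegs (b :: l) := by
  simp [pvSegs]

theorem pvSegs_map (l : List Int) (f : Int → Int) :
    pvSegs (l.map f) = (pvSegs l).map (Prod.map f f) := by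
  rw [pvSegs, pvSegs, ← List.map_tail, List.zip_map]

theorem pvHeadTail {α : Type} [Inhabited α] (l : List α) (h : l ≠ []) :
    l = l.headI :: l.tail := by
  cases l with
  | nil => exact absurd rfl h
  | cons a t => rfl

theorem pvMapRoutes_cons (r : List Int) (rs : List (List Int)) :
    pvMapRoutes (r :: rs) = (if r.isEmpty then [] else [pvRoute r]) ++ pvMapRoutes rs := by
  by_cases h : r.isEmpty <;> simp [pvMapRoutes, h]

theorem pvPred_shift :
    ((fun p : Int × Int => decide (1 < p.2 - p.1)) ∘ Prod.map (· + 1) (· + 1))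
      = fun p : Int × Int => decide (1 < p.2 - p.1) := by
  funext p
  obtain ⟨a, b⟩ := p
  simp only [Function.comp_apply, Prod.map_apply, decide_eq_decide]
  omega

-- shifted slice over a cons
theorem pvBody_shift (t : List Int) (v : Int) (p : Int × Int)
    (h1 : -1 ≤ p.1) (h2 : p.1 + 1 < p.2) :
    pvBody (v :: t) (Prod.map (· + 1) (· + 1) p) = pvBody t p := by
  obtain ⟨a, b⟩ := p
  simp only [pvBody, Prod.map_apply] at *
  rw [PySem.List.slice_toNat _ (by omega) (by omega),
    PySem.List.slice_toNat _ (by omega) (by omega),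
    show (a + 1 + 1).toNat = (a + 1).toNat + 1 from by omega, List.drop_succ_cons,
    show (b + 1).toNat - ((a + 1).toNat + 1) = b.toNat - (a + 1).toNat from by omega]

theorem pvMapShift_congr (t : List Int) (v : Int) (l : List Int)
    (hl : ∀ x ∈ l, -1 ≤ x) :
    ((pvSegs l).filter (fun p => decide (1 < p.2 - p.1))).map
        (pvBody (v :: t) ∘ Prod.map (· + 1) (· + 1))
      = ((pvSegs l).filter (fun p => decide (1 < p.2 - p.1))).map (pvBody t) := by
  apply List.map_eq_map_iff.mpr
  intro p hp
  rw [List.mem_filter] at hp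
  obtain ⟨hmem, hpred⟩ := hp
  rw [pvSegs] at hmem
  have h1 : -1 ≤ p.1 := hl p.1 (List.of_mem_zip hmem).1
  have h2 : 1 < p.2 - p.1 := by simpa using hpred
  exact pvBody_shift t v p h1 (by omega)

theorem pvBody_first (t : List Int) (v c : Int) (hc : 0 ≤ c) :
    pvBody (v :: t) (-1, c + 1)
      = 0 :: (v - 1) :: ((PySem.List.slice t (some 0) (some c)).map (fun v => v - 1) ++ [0]) := by
  simp only [pvBody]
  rw [show (-1 : Int) + 1 = 0 from rfl,
    PySem.List.slice_toNat _ le_rfl (by omega),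
    PySem.List.slice_toNat _ le_rfl hc,
    show ((0 : Int)).toNat = 0 from rfl, List.drop_zero, List.drop_zero,
    show (c + 1).toNat - 0 = (c.toNat - 0) + 1 from by omega, List.take_succ_cons]
  simp

-- the first run is empty exactly when the first cut after -1 is 0
theorem pvHead_iff (t : List Int) (d c1 : Int) (rest' : List Int)
    (h : pvPos t d 0 ++ [(t.length : Int)] = c1 :: rest') :
    ((pvRuns t d).headI = [] ↔ c1 = 0) ∧ 0 ≤ c1 := by
  cases t with
  | nil =>
    have h0 : pvPos ([] : List Int) d 0 = [] := rfl
    rw [h0] at h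
    simp only [List.length_nil, Nat.cast_zero, List.nil_append, List.cons.injEq] at h
    obtain ⟨h1, h2⟩ := h
    exact ⟨⟨fun _ => by omega, fun _ => rfl⟩, by omega⟩
  | cons w t' =>
    by_cases hw : w == d
    · have hp : pvPos (w :: t') d 0 = 0 :: pvPos t' d (0 + 1) := by
        rw [pvPos_cons]; simp [hw]
      rw [hp] at h
      simp only [List.cons_append, List.cons.injEq] at h
      obtain ⟨h1, h2⟩ := h
      rw [pvRuns_cons_depot t' d w hw]
      exact ⟨⟨fun _ => by omega, fun _ => rfl⟩, by omega⟩
    · have hp : pvPos (w :: t') d 0 = (pvPos t' d 0).map (· + 1) := by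
        rw [pvPos_cons, pvPos_succ]; simp [hw]
      rw [hp] at h
      have hpos : 0 < c1 := by
        cases hq : pvPos t' d 0 with
        | nil =>
          rw [hq] at h
          simp only [List.map_nil, List.nil_append, List.cons.injEq,
            List.length_cons, Nat.cast_add, Nat.cast_one] at h
          obtain ⟨h1, h2⟩ := h
          omega
        | cons p ps =>
          rw [hq] at h
          simp only [List.map_cons, List.cons_append, List.cons.injEq] at h
          obtain ⟨h1, h2⟩ := h
          have hm : p ∈ pvPos t' d 0 := by rw [hq]; exact List.mem_cons_self
          have := pvPos_le t' d 0 p hm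
          omega
      rw [pvRuns_cons_other t' d w hw]
      refine ⟨?_, by omega⟩
      constructor
      · intro hx; exact absurd hx (by simp)
      · intro hx; exact absurd hx (by omega)

theorem pvBridge (tour : List Int) (d : Int) :
    pvRoutesB tour d = pvMapRoutes (pvRuns tour d) := by
  induction tour with
  | nil =>
    have h0 : pvCuts ([] : List Int) d = [-1, 0] := rfl
    rw [pvRoutesB, h0]
    simp [pvSegs, pvRuns, pvRunsFrom, pvMapRoutes]
  | cons v t ih =>
    have hC2 : pvCuts t d = -1 :: (pvPos t d 0 ++ [(t.length : Int)]) := pvCuts_eq t d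
    by_cases hv : v == d
    · rw [pvRoutesB, pvCuts_cons_depot t d v hv, hC2, List.map_cons, pvSegs_cons_cons,
        List.filter_cons, if_neg (by decide),
        show ((-1 : Int) + 1) :: (pvPos t d 0 ++ [(t.length : Int)]).map (· + 1)
          = ((-1 :: (pvPos t d 0 ++ [(t.length : Int)])).map (· + 1)) from rfl,
        ← hC2, pvSegs_map, List.filter_map, pvPred_shift, List.map_map,
        pvMapShift_congr t v (pvCuts t d) (fun x hx => pvCuts_mem_le t d x hx)]
      rw [pvRoutesB] at ih
      rw [ih, pvRuns_cons_depot t d v hv, pvMapRoutes_cons]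
      simp
    · obtain ⟨c1, rest', hr⟩ : ∃ c1 rest', pvPos t d 0 ++ [(t.length : Int)] = c1 :: rest' := by
        cases hrr : pvPos t d 0 ++ [(t.length : Int)] with
        | nil => exact absurd hrr (by simp)
        | cons a l => exact ⟨a, l, rfl⟩
      obtain ⟨hiff, hc1⟩ := pvHead_iff t d c1 rest' hr
      have hC : pvCuts t d = -1 :: c1 :: rest' := by rw [pvCuts_eq, hr]
      have hmem' : ∀ x ∈ c1 :: rest', -1 ≤ x := fun x hx =>
        pvCuts_mem_le t d x (by rw [hC]; exact List.mem_cons_of_mem _ hx)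
      have hne : pvRuns t d ≠ [] := by simp [pvRuns, pvRunsFrom]
      rw [pvRoutesB, pvCuts_cons_other t d v hv, hC, List.map_cons, List.map_cons,
        List.tail_cons, pvSegs_cons_cons, List.filter_cons,
        if_pos (by simp only [decide_eq_true_eq]; omega),
        show (c1 + 1) :: rest'.map (· + 1) = (c1 :: rest').map (· + 1) from rfl,
        pvSegs_map, List.filter_map, pvPred_shift, List.map_cons, List.map_map,
        pvMapShift_congr t v (c1 :: rest') hmem']
      rw [pvRoutesB, hC, pvSegs_cons_cons, List.filter_cons] at ih
      rw [pvRuns_cons_other t d v hv, pvMapRoutes_cons, if_neg (by simp)]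
      by_cases hc0 : c1 = 0
      · subst hc0
        have hH : (pvRuns t d).headI = [] := hiff.mpr rfl
        rw [if_neg (by decide), pvHeadTail _ hne, hH, pvMapRoutes_cons] at ih
        simp only [List.isEmpty_nil, if_pos, List.nil_append] at ih
        rw [ih, hH, pvBody_first t v 0 le_rfl]
        have hsl : PySem.List.slice t (some 0) (some 0) = ([] : List Int) := by
          rw [PySem.List.slice_toNat _ le_rfl le_rfl]; simp
        rw [hsl]
        simp [pvRoute]
      · have hc1' : 0 < c1 := by omega
        have hHne : (pvRuns t d).headI ≠ [] := fun hh => hc0 (hiff.mp hh)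
        rw [if_pos (by simp only [decide_eq_true_eq]; omega), pvHeadTail _ hne,
          pvMapRoutes_cons, if_neg (by simp [List.isEmpty_iff, hHne])] at ih
        rw [List.map_cons, List.singleton_append] at ih
        rw [List.cons_eq_cons] at ih
        obtain ⟨ih1, ih2⟩ := ih
        have key : (PySem.List.slice t (some 0) (some c1)).map (fun v => v - 1)
            = ((pvRuns t d).headI).map (fun v => v - 1) := by
          rw [pvBody, pvRoute] at ih1
          simp only [List.cons_eq_cons, show (-1 : Int) + 1 = 0 from rfl] at ih1
          exact List.append_cancel_right ih1.2
        rw [ih2, pvBody_first t v c1 (le_of_lt hc1'), key]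
        simp [pvRoute]

-- ===== VERDICT (by name: the statement is the Claim_ definition above) =====
theorem split_multi_routes_py_spec : Claim_equal_split_multi_routes_py := by
  intro tour d _
  show split_multi_routes_py tour d = split_multi_routes_py_alt tour d
  have hA := pvCorr tour d [] []
  simp only [List.map_nil, List.nil_append] at hA
  have hB := pvBridge tour d
  have hA' : pvFlushA (tour.foldl (pvStepA d) ([], [0])) = pvMapRoutes (pvRuns tour d) := hA
  have hB' : (((pvCuts tour d).zip (PySem.List.slice (pvCuts tour d) (some 1) none)).filter
      (fun p => decide (1 < p.2 - p.1))).map (pvBody tour) = pvMapRoutes (pvRuns tour d) := by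
    rw [PySem.List.slice_from_one]; exact hB
  simp only [split_multi_routes_py, split_multi_routes_py_alt]
  rw [hA', hB']
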